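-- pv_equiv track=rewrite | github.com/Kdkunal45/sumo | app.py | parse_flashcards
-- ===== SOURCE A (Python) =====
-- def parse_flashcards(flashcards_text):
--     # This is a simple parser and might need to be adjusted based on the actual output format
--     flashcards = []
--     lines = flashcards_text.split('\n')
--     for i in range(0, len(lines), 3):
--         if i + 1 < len(lines):
--             question = lines[i].split(': ', 1)[1] if ': ' in lines[i] else lines[i]
--             answer = lines[i+1].split(': ', 1)[1] if ': ' in lines[i+1] else lines[i+1]
--             flashcards.append({'question': question, 'answer': answer})
--     return flashcards
-- ===== SOURCE B (Python) =====
-- def parse_flashcards(flashcards_text):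
--     cards = []
--     state = 0
--     pending = ''
--     for line in flashcards_text.split('\n'):
--         value = line.split(': ', 1)[1] if ': ' in line else line
--         if state == 0:
--             pending = value
--         elif state == 1:
--             cards.append({'question': pending, 'answer': value})
--         state = (state + 1) % 3
--     return cards
-- ===== Notes on version B (the rewrite author's own statement) =====
-- stated objective: alternative
-- what changed: Replaces A's index loop over range(0, len(lines), 3) with bounds-guarded lines[i]/lines[i+1] lookups by a single linewise pass: a mod-3 state machine that holds the pending question in an accumulator and emits a card when the answer line arrives, with no indexing at all.
import Mathlib
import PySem

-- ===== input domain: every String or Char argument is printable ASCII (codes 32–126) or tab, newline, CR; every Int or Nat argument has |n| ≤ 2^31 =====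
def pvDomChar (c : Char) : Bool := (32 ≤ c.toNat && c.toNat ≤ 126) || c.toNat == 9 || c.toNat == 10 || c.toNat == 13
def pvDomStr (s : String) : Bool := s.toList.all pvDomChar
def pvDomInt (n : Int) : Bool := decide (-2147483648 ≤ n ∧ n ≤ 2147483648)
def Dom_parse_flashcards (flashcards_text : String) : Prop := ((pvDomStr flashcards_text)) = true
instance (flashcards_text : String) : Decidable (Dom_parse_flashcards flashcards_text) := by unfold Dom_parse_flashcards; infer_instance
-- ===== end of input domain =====

-- B replaces A's stride-3 index loop (with lines[i]/lines[i+1] lookups behind an i+1 < len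
-- guard) by a single index-free linewise pass: a mod-3 state machine carrying the pending
-- question and emitting a card when the answer line arrives (alternative; same cost).

-- ===== PORT A =====
def parse_flashcards (flashcards_text : String) : List (List (String × String)) :=
  let lines := (PySem.Str.split? flashcards_text "\n").getD []
  (PySem.List.pyRange 0 (lines.length : Int) 3).foldl
    (fun flashcards i =>
      if i + 1 < (lines.length : Int) then
        let li := PySem.List.pyGetD lines i ""
        let li1 := PySem.List.pyGetD lines (i + 1) ""
        let question := if PySem.Str.isIn ": " li then
            PySem.List.pyGetD ((PySem.Str.splitMax? li ": " 1).getD []) 1 "" else li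
        let answer := if PySem.Str.isIn ": " li1 then
            PySem.List.pyGetD ((PySem.Str.splitMax? li1 ": " 1).getD []) 1 "" else li1
        flashcards ++ [[("question", question), ("answer", answer)]]
      else flashcards) []

-- ===== PORT B =====
-- value = line.split(': ', 1)[1] if ': ' in line else line
def stripValAlt (s : String) : String :=
  if PySem.Str.isIn ": " s then
    PySem.List.pyGetD ((PySem.Str.splitMax? s ": " 1).getD []) 1 "" else s

-- one loop iteration of B's state machine: (cards, state, pending) and the current line
def stepAlt (st : List (List (String × String)) × Int × String) (line : String) :
    List (List (String × String)) × Int × String :=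
  let value := stripValAlt line
  if st.2.1 = 0 then (st.1, PySem.Int.mod (st.2.1 + 1) 3, value)
  else if st.2.1 = 1 then
    (st.1 ++ [[("question", st.2.2), ("answer", value)]], PySem.Int.mod (st.2.1 + 1) 3, st.2.2)
  else (st.1, PySem.Int.mod (st.2.1 + 1) 3, st.2.2)

def parse_flashcards_alt (flashcards_text : String) : List (List (String × String)) :=
  let lines := (PySem.Str.split? flashcards_text "\n").getD []
  (lines.foldl stepAlt ([], 0, "")).1

-- ===== PRECONDITION & SPEC =====
def Spec_parse_flashcards (flashcards_text : String) (out : List (List (String × String))) : Prop := out = parse_flashcards_alt flashcards_text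
instance (flashcards_text : String) (out : List (List (String × String))) : Decidable (Spec_parse_flashcards flashcards_text out) := by unfold Spec_parse_flashcards; infer_instance

-- ===== CLAIM (what is proved, stated in full; the proofs are below) =====
def Claim_equal_parse_flashcards : Prop := ∀ (flashcards_text : String), Dom_parse_flashcards flashcards_text → Spec_parse_flashcards flashcards_text (parse_flashcards flashcards_text)

-- ===== LEMMAS AND PROOFS =====

-- common characterisation: chunk the lines in threes, take a card from the first two of a chunk
def chunkSpec : List String → List (List (String × String))
  | [] => []
  | [_] => []
  | [q, a] => [[("question", stripValAlt q), ("answer", stripValAlt a)]]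
  | q :: a :: _ :: rest =>
      [("question", stripValAlt q), ("answer", stripValAlt a)] :: chunkSpec rest

lemma pyRange_three (n : Nat) :
    PySem.List.pyRange 0 (n : Int) 3 =
      (List.range ((n + 2) / 3)).map (fun k : Nat => 3 * (k : Int)) := by
  rw [PySem.List.pyRange_of_pos 0 (n : Int) (by norm_num)]
  have hc : (if (0:Int) < (n:Int) then (((n:Int) - 0 + 3 - 1) / 3).toNat else 0) = (n + 2) / 3 := by
    split <;> omega
  rw [hc]
  exact List.map_congr_left (fun k _ => by ring)

lemma filter_range_lt (a b : Nat) :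
    (List.range a).filter (fun k => decide (k < b)) = List.range (min a b) := by
  induction a with
  | zero => simp
  | succ a ih =>
    rw [List.range_succ, List.filter_append, ih]
    by_cases h : a < b
    · have h1 : min a b = a := by omega
      have h2 : min (a + 1) b = a + 1 := by omega
      simp [h, h1, List.range_succ]
    · have h1 : min a b = b := by omega
      have h2 : min (a + 1) b = b := by omega
      simp [h, h1, h2]

lemma foldl_append_if' {β : Type} (p : Nat → Prop) [DecidablePred p] (f : Nat → β)
    (l : List Nat) (acc : List β) :
    l.foldl (fun acc x => if p x then acc ++ [f x] else acc) acc
      = acc ++ (l.filter (fun x => decide (p x))).map f := by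
  induction l generalizing acc with
  | nil => simp
  | cons x xs ih =>
    simp only [List.foldl_cons, List.filter_cons]
    by_cases h : p x <;> simp [h, ih]

-- A's loop computes the map form
lemma a_eq_mapform (L : List String) :
    (PySem.List.pyRange 0 (L.length : Int) 3).foldl
      (fun flashcards i =>
        if i + 1 < (L.length : Int) then
          let li := PySem.List.pyGetD L i ""
          let li1 := PySem.List.pyGetD L (i + 1) ""
          let question := if PySem.Str.isIn ": " li then
              PySem.List.pyGetD ((PySem.Str.splitMax? li ": " 1).getD []) 1 "" else li
          let answer := if PySem.Str.isIn ": " li1 then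
              PySem.List.pyGetD ((PySem.Str.splitMax? li1 ": " 1).getD []) 1 "" else li1
          flashcards ++ [[("question", question), ("answer", answer)]]
        else flashcards) []
    = (List.range ((L.length + 1) / 3)).map
        (fun k => [("question", stripValAlt (L.getD (3 * k) "")),
                   ("answer", stripValAlt (L.getD (3 * k + 1) ""))]) := by
  rw [pyRange_three, List.foldl_map]
  rw [foldl_append_if' (p := fun k : Nat => 3 * (k : Int) + 1 < (L.length : Int))]
  rw [List.filter_congr (l := List.range ((L.length + 2) / 3))
      (q := fun k => decide (k < (L.length + 1) / 3))
      (fun k _ => by simp only [decide_eq_decide]; omega)]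
  rw [filter_range_lt, show min ((L.length + 2) / 3) ((L.length + 1) / 3) = (L.length + 1) / 3 by omega]
  simp only [List.nil_append]
  apply List.map_congr_left
  intro k hk
  simp only [List.mem_range] at hk
  have hb1 : (3 * k : Nat) < L.length := by omega
  have hb2 : (3 * k + 1 : Nat) < L.length := by omega
  rw [PySem.List.pyGetD_eq_getElem L "" (by positivity) (by omega)]
  rw [PySem.List.pyGetD_eq_getElem L "" (by positivity) (by omega)]
  have h1 : ((3 : Int) * (k : Int)).toNat = 3 * k := by omega
  have h2 : ((3 : Int) * (k : Int) + 1).toNat = 3 * k + 1 := by omega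
  rw [List.getD_eq_getElem?_getD, List.getElem?_eq_getElem hb1,
      List.getD_eq_getElem?_getD, List.getElem?_eq_getElem hb2]
  simp [stripValAlt, h1, h2]

lemma mapform_eq_chunkSpec (L : List String) :
    (List.range ((L.length + 1) / 3)).map
        (fun k => [("question", stripValAlt (L.getD (3 * k) "")),
                   ("answer", stripValAlt (L.getD (3 * k + 1) ""))])
      = chunkSpec L := by
  induction L using chunkSpec.induct with
  | case1 => simp [chunkSpec]
  | case2 q => simp [chunkSpec]
  | case3 q a => simp [chunkSpec, List.range_succ]
  | case4 q a c rest ih =>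
    have hlen : ((q :: a :: c :: rest).length + 1) / 3 = (rest.length + 1) / 3 + 1 := by
      simp only [List.length_cons]; omega
    rw [hlen, List.range_succ_eq_map, List.map_cons, List.map_map]
    rw [chunkSpec]
    have ih' : List.map
        ((fun k => [("question", stripValAlt ((q :: a :: c :: rest).getD (3 * k) "")),
                    ("answer", stripValAlt ((q :: a :: c :: rest).getD (3 * k + 1) ""))]) ∘ Nat.succ)
        (List.range ((rest.length + 1) / 3)) = chunkSpec rest := by
      rw [← ih]
      apply List.map_congr_left
      intro k _
      have e1 : 3 * (k + 1) = 3 * k + 1 + 1 + 1 := by ring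
      simp [Function.comp, e1]
    rw [ih']
    norm_num [List.getD]

-- B's state machine: one step from each of the three states
lemma step0 (c : List (List (String × String))) (p line : String) :
    stepAlt (c, 0, p) line = (c, 1, stripValAlt line) := by
  simp only [stepAlt]; norm_num [PySem.Int.mod]
  decide

lemma step1 (c : List (List (String × String))) (p line : String) :
    stepAlt (c, 1, p) line
      = (c ++ [[("question", p), ("answer", stripValAlt line)]], 2, p) := by
  simp only [stepAlt]; norm_num [PySem.Int.mod]
  decide

lemma step2 (c : List (List (String × String))) (p line : String) :
    stepAlt (c, 2, p) line = (c, 0, p) := by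
  simp only [stepAlt]; norm_num [PySem.Int.mod]

lemma b_eq_chunkSpec (L : List String) (cards : List (List (String × String))) (p : String) :
    (L.foldl stepAlt (cards, 0, p)).1 = cards ++ chunkSpec L := by
  induction L using chunkSpec.induct generalizing cards p with
  | case1 => simp [chunkSpec]
  | case2 q => simp [chunkSpec, step0]
  | case3 q a =>
    simp only [List.foldl_cons, List.foldl_nil, step0, step1, chunkSpec]
  | case4 q a c rest ih =>
    simp only [List.foldl_cons, step0, step1, step2]
    rw [ih]
    simp [chunkSpec]

-- ===== VERDICT (by name: the statement is the Claim_ definition above) =====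
theorem parse_flashcards_spec : Claim_equal_parse_flashcards := by
  intro s _
  unfold Spec_parse_flashcards parse_flashcards parse_flashcards_alt
  rw [a_eq_mapform, mapform_eq_chunkSpec, b_eq_chunkSpec, List.nil_append]
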